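-- pv_equiv track=rewrite | github.com/k-harada/AtCoder | other_contests/HITACHI2020/A.py | solve
-- ===== SOURCE A (Python) =====
-- def solve(s):
--     if len(s) % 2 == 1:
--         return "No"
--     for i, x in enumerate(s):
--         if i % 2 == 0 and x != "h":
--             return "No"
--         if i % 2 == 1 and x != "i":
--             return "No"
--     return "Yes"
-- ===== SOURCE B (Python) =====
-- def solve(s):
--     return "Yes" if s == "hi" * (len(s) // 2) else "No"
-- ===== Notes on version B (the rewrite author's own statement) =====
-- stated objective: idiomatic
-- what changed: Replaces the explicit odd-length check and per-index parity scan with constructing the expected pattern 'hi'*(len(s)//2) once and comparing it to s for equality.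
import Mathlib
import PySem

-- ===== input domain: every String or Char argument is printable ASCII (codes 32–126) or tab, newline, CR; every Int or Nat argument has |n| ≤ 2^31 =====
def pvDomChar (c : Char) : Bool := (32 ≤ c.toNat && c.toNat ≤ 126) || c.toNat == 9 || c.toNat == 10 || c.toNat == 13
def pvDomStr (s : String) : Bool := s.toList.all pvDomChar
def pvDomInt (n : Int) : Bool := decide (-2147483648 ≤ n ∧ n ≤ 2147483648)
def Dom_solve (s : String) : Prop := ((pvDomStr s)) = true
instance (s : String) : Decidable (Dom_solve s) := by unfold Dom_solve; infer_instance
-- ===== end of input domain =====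

-- B builds the expected pattern "hi" * (len//2) and compares it to s, instead of A's odd-length check and per-index parity scan.


-- ===== PORT A =====
-- the for-loop over enumerate(s) with early returns
def solveLoop : List Char → Nat → String
  | [], _ => "Yes"
  | x :: xs, i =>
    if i % 2 = 0 ∧ x ≠ 'h' then "No"
    else if i % 2 = 1 ∧ x ≠ 'i' then "No"
    else solveLoop xs (i + 1)

def solve (s : String) : String :=
  if s.toList.length % 2 = 1 then "No"
  else solveLoop s.toList 0

-- ===== PORT B =====
-- "hi" * k  (Python string repetition)
def hiRep : Nat → List Char
  | 0 => []
  | n + 1 => 'h' :: 'i' :: hiRep n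

def solve_alt (s : String) : String :=
  if s = String.ofList (hiRep (s.toList.length / 2)) then "Yes" else "No"

-- ===== PRECONDITION & SPEC =====
def Spec_solve (s : String) (out : String) : Prop := out = solve_alt s
instance (s : String) (out : String) : Decidable (Spec_solve s out) := by unfold Spec_solve; infer_instance

-- ===== CLAIM (what is proved, stated in full; the proofs are below) =====
def Claim_equal_solve : Prop := ∀ (s : String), Dom_solve s → Spec_solve s (solve s)

-- ===== LEMMAS AND PROOFS =====

-- only the parity of the index matters in the loop
theorem solveLoop_add_two (l : List Char) : ∀ i, solveLoop l (i + 2) = solveLoop l i := by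
  induction l with
  | nil => intro i; rfl
  | cons x xs ih =>
    intro i
    simp only [solveLoop, Nat.add_mod_right]
    split_ifs <;> simp [ih (i + 1), Nat.add_right_comm i 2 1]

-- the main characterisation, two characters at a time
theorem solve_eq_alt_list : ∀ l : List Char,
    (if l.length % 2 = 1 then "No" else solveLoop l 0)
      = (if l = hiRep (l.length / 2) then "Yes" else "No")
  | [] => by simp [hiRep, solveLoop]
  | [a] => by simp [hiRep]
  | a :: b :: xs => by
    have ih := solve_eq_alt_list xs
    have hlen : (a :: b :: xs).length = xs.length + 2 := by simp
    rw [hlen]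
    have h2 : (xs.length + 2) % 2 = xs.length % 2 := Nat.add_mod_right _ _
    have h3 : (xs.length + 2) / 2 = xs.length / 2 + 1 := by omega
    rw [h2, h3]
    simp only [hiRep, solveLoop]
    by_cases ha : a = 'h'
    · by_cases hb : b = 'i'
      · subst ha; subst hb
        simpa [solveLoop_add_two xs 0] using ih
      · simp [ha, hb]
    · simp [ha]
termination_by l => l.length

-- a string equals String.ofList L iff its character list equals L
theorem eq_ofList_iff (s : String) (L : List Char) : (s = String.ofList L) ↔ (s.toList = L) := by
  constructor
  · intro h; subst h; simp
  · intro h; apply String.ext; simpa using h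

-- ===== VERDICT (by name: the statement is the Claim_ definition above) =====
theorem solve_spec : Claim_equal_solve := by
  intro s _
  unfold Spec_solve solve solve_alt
  rw [solve_eq_alt_list s.toList]
  simp only [eq_ofList_iff]
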